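-- pv_equiv track=rewrite | github.com/porrametict/Verification-Of-Eternity-Python- | process/inputFilter.py | countOperator
-- ===== SOURCE A (Python) =====
-- def countOperator(text:str):
--     count = 0
--     operator ="!%&>|"
--     for i in text :
--         if i in operator :
--             count += 1
--     if count >6 :
--         return True
--     else :
--         return False
-- ===== SOURCE B (Python) =====
-- def countOperator(text: str):
--     return sum(text.count(op) for op in "!%&>|") > 6
-- ===== Notes on version B (the rewrite author's own statement) =====
-- stated objective: simpler
-- what changed: Replaces the per-character Python loop with a membership test by a sum of text.count(op) over the five operator characters (iterating the operator alphabet instead of the text) and returns the comparison directly.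
import Mathlib
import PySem

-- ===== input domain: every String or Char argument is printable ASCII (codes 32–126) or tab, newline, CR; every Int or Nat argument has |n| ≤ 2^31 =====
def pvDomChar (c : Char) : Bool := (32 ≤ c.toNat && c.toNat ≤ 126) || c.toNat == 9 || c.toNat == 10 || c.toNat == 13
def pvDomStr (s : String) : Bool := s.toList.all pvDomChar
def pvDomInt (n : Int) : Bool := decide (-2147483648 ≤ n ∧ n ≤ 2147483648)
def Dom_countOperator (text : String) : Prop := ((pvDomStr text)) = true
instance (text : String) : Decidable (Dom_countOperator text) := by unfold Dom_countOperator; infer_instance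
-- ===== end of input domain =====

-- B sums text.count(op) over the five operator characters instead of looping over the text (simpler decomposition).
-- ===== PORT A =====
def countOperator (text : String) : Bool :=
  let operator : String := "!%&>|"
  let count : Int :=
    text.toList.foldl (fun count i => if operator.toList.contains i then count + 1 else count) 0
  if count > 6 then true else false

-- ===== PORT B =====
def countOperator_alt (text : String) : Bool :=
  decide (("!%&>|".toList.foldl
      (fun s op => s + (PySem.Str.count text (String.singleton op) : Int)) 0) > 6)

-- ===== PRECONDITION & SPEC =====
def Spec_countOperator (text : String) (out : Bool) : Prop := out = countOperator_alt text
instance (text : String) (out : Bool) : Decidable (Spec_countOperator text out) := by unfold Spec_countOperator; infer_instance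

-- ===== CLAIM (what is proved, stated in full; the proofs are below) =====
def Claim_equal_countOperator : Prop := ∀ (text : String), Dom_countOperator text → Spec_countOperator text (countOperator text)

-- ===== LEMMAS AND PROOFS =====

-- single-character substring count is element count
theorem chars_count_go_single (c : Char) (l : List Char) : ∀ (fuel acc : Nat),
    l.length ≤ fuel → PySem.Chars.count.go [c] fuel l acc = acc + l.count c := by
  induction l with
  | nil => intro fuel acc _; cases fuel <;> simp [PySem.Chars.count.go]
  | cons x t ih =>
    intro fuel acc h
    cases fuel with
    | zero => simp at h
    | succ n =>
      rw [PySem.Chars.count.go]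
      by_cases hx : x = c
      · subst hx
        have hpre : [x].isPrefixOf (x :: t) = true := by simp [List.isPrefixOf]
        simp only [hpre, if_true, List.length_cons, List.drop_succ_cons, List.drop_zero,
          List.length_nil]
        rw [ih n (acc + 1) (by simpa using h)]
        simp [List.count_cons]
        omega
      · have hpre : [c].isPrefixOf (x :: t) = false := by
          simp [List.isPrefixOf]
          exact fun h' => hx h'.symm
        simp only [hpre]
        rw [if_neg (by simp [hpre])]
        rw [ih n acc (by simpa using h)]
        simp [List.count_cons, hx]

theorem chars_count_single (c : Char) (s : List Char) :
    PySem.Chars.count s [c] = s.count c := by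
  have := chars_count_go_single c s s.length 0 (le_refl _)
  simpa [PySem.Chars.count] using this

theorem countP_contains_cons (cs : List Char) (o : Char) (ops : List Char) (h : ¬ o ∈ ops) :
    cs.countP (fun i => (o :: ops).contains i) =
      cs.count o + cs.countP (fun i => ops.contains i) := by
  induction cs with
  | nil => simp
  | cons x t ih =>
    simp only [List.countP_cons, List.count_cons, ih]
    by_cases hx : x = o
    · subst hx
      simp [h]
      omega
    · by_cases hx2 : x ∈ ops <;> simp [hx, hx2] <;> omega

theorem sum_counts (cs : List Char) : ∀ (ops : List Char), ops.Nodup → ∀ (a : Int),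
    ops.foldl (fun s op => s + (cs.count op : Int)) a =
      a + (cs.countP (fun i => ops.contains i) : Int) := by
  intro ops
  induction ops with
  | nil => intro _ a; simp
  | cons o t ih =>
    intro hnd a
    have h1 : ¬ o ∈ t := by
      simp only [List.nodup_cons] at hnd; exact hnd.1
    simp only [List.foldl_cons]
    rw [ih hnd.of_cons, countP_contains_cons cs o t h1]
    push_cast
    ring

-- ===== VERDICT (by name: the statement is the Claim_ definition above) =====
theorem countOperator_spec : Claim_equal_countOperator := by
  intro text _
  unfold Spec_countOperator countOperator countOperator_alt
  have hB : ∀ op : Char,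
      (PySem.Str.count text (String.singleton op) : Int) = (text.toList.count op : Int) := by
    intro op
    have h1 : PySem.Str.count text (String.singleton op) = PySem.Chars.count text.toList [op] := by
      simp [String.singleton]
    rw [h1, chars_count_single]
  have hfun : ("!%&>|".toList.foldl
      (fun s op => s + (PySem.Str.count text (String.singleton op) : Int)) 0) =
      ("!%&>|".toList.foldl (fun s op => s + (text.toList.count op : Int)) 0) := by
    apply PySem.List.foldl_congr_mem
    intro a x _; rw [hB]
  have hsum : ("!%&>|".toList.foldl
      (fun s op => s + (PySem.Str.count text (String.singleton op) : Int)) 0) =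
      (text.toList.countP (fun i => "!%&>|".toList.contains i) : Int) := by
    rw [hfun, sum_counts text.toList "!%&>|".toList (by decide) 0]
    simp
  have hA : (text.toList.foldl
      (fun count i => if ("!%&>|" : String).toList.contains i then count + 1 else count) (0 : Int)) =
      (text.toList.countP (fun i => "!%&>|".toList.contains i) : Int) := by
    rw [PySem.List.foldl_if_add_one]
    simp only [Int.zero_add]
  simp only [hsum, hA]
  by_cases h : (text.toList.countP (fun i => "!%&>|".toList.contains i) : Int) > 6 <;>
    simp [h]
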